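-- pv_equiv track=rewrite | github.com/MayFu2025/unit-1 | quizzes/quiz_files/quiz_006.py | locate_room
-- ===== SOURCE A (Python) =====
-- def locate_room(room_number:int)->str:
--     count = 0
--     floor = 0
--     for n in range (1, room_number+1):
--         for f in range(1, 10+1):
--             for r in range(1, 10+1):
--                 count += 1
--             floor += 1
--     return (f'{floor}- Room{floor}F{r:02d}')
-- ===== SOURCE B (Python) =====
-- def locate_room(room_number: int) -> str:
--     floor = 10 * room_number
--     return f'{floor}- Room{floor}F10'
-- ===== Notes on version B (the rewrite author's own statement) =====
-- stated objective: faster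
-- what changed: Replaced the triple nested counting loops with the closed form floor = 10*room_number and the constant room suffix F10.
import Mathlib
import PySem

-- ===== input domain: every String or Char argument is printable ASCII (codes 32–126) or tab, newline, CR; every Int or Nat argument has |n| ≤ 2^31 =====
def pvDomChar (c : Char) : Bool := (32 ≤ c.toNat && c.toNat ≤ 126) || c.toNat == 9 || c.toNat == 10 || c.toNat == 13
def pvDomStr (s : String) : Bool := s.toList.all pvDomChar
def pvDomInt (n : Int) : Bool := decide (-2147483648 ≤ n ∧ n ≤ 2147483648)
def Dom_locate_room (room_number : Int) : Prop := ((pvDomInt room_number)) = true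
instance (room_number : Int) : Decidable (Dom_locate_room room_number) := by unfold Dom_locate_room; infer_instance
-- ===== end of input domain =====

-- B replaces A's triple nested counting loops by the closed form floor = 10*room_number (objective: faster).

-- ===== PORT A =====
-- exact hand-port of Python's f'{r:02d}' for the values reached here (nonnegative r): left-pad with '0' to width 2
def pvFmt02d (n : Int) : String :=
  let s := PySem.Int.toStr n
  if s.length < 2 then "0" ++ s else s

def locate_room (room_number : Int) : String :=
  -- state = (count, floor, last value of r as Option — none models 'r unbound')
  let st := (PySem.List.pyRange 1 (room_number + 1) 1).foldl
    (fun (s : Int × Int × Option Int) _n =>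
      (PySem.List.pyRange 1 11 1).foldl
        (fun (t : Int × Int × Option Int) _f =>
          let t2 := (PySem.List.pyRange 1 11 1).foldl
            (fun (u : Int × Int × Option Int) r => (u.1 + 1, u.2.1, some r)) t
          (t2.1, t2.2.1 + 1, t2.2.2)) s)
    ((0 : Int), (0 : Int), (none : Option Int))
  let floor := st.2.1
  let r := st.2.2.getD 0
  PySem.Int.toStr floor ++ "- Room" ++ PySem.Int.toStr floor ++ "F" ++ pvFmt02d r

-- ===== PORT B =====
def locate_room_alt (room_number : Int) : String :=
  let floor := 10 * room_number
  PySem.Int.toStr floor ++ "- Room" ++ PySem.Int.toStr floor ++ "F10"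

-- ===== PRECONDITION & SPEC =====
-- Pre_ excludes room_number < 1, where A raises UnboundLocalError (r never bound).
def Pre_locate_room (room_number : Int) : Prop := 1 ≤ room_number
instance (room_number : Int) : Decidable (Pre_locate_room room_number) := by unfold Pre_locate_room; infer_instance
def pvWitness_locate_room : Int := 3

def Spec_locate_room (room_number : Int) (out : String) : Prop := out = locate_room_alt room_number
instance (room_number : Int) (out : String) : Decidable (Spec_locate_room room_number out) := by unfold Spec_locate_room; infer_instance

-- ===== CLAIM =====
def Claim_equal_locate_room : Prop := ∀ (room_number : Int), Dom_locate_room room_number → Pre_locate_room room_number → Spec_locate_room room_number (locate_room room_number)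

-- ===== LEMMAS AND PROOFS =====
-- one outer iteration: count += 100, floor += 10, r ends at 10
theorem pv_inner_step (s : Int × Int × Option Int) :
    (PySem.List.pyRange 1 11 1).foldl
        (fun (t : Int × Int × Option Int) _f =>
          let t2 := (PySem.List.pyRange 1 11 1).foldl
            (fun (u : Int × Int × Option Int) r => (u.1 + 1, u.2.1, some r)) t
          (t2.1, t2.2.1 + 1, t2.2.2)) s = (s.1 + 100, s.2.1 + 10, some 10) := by
  obtain ⟨c, fl, ro⟩ := s
  have h : PySem.List.pyRange 1 11 1 = [1,2,3,4,5,6,7,8,9,10] := by decide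
  simp only [h, List.foldl]
  norm_num
  omega

set_option maxRecDepth 4000 in
theorem pv_outer (k : Nat) (hk : 1 ≤ k) :
    (PySem.List.pyRange 1 ((k : Int) + 1) 1).foldl
      (fun (s : Int × Int × Option Int) _n =>
        (PySem.List.pyRange 1 11 1).foldl
          (fun (t : Int × Int × Option Int) _f =>
            let t2 := (PySem.List.pyRange 1 11 1).foldl
              (fun (u : Int × Int × Option Int) r => (u.1 + 1, u.2.1, some r)) t
            (t2.1, t2.2.1 + 1, t2.2.2)) s)
      ((0 : Int), (0 : Int), (none : Option Int))
      = (100 * (k : Int), 10 * (k : Int), some 10) := by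
  induction k with
  | zero => omega
  | succ m ih =>
    by_cases hm : 1 ≤ m
    · have hsplit : PySem.List.pyRange 1 ((m : Int) + 1 + 1) 1
          = PySem.List.pyRange 1 ((m : Int) + 1) 1 ++ [(m : Int) + 1] := by
        have := PySem.List.pyRange_one_succ_right (a := 1) (b := (m : Int) + 1) (by omega)
        simpa using this
      push_cast
      rw [hsplit, List.foldl_append, ih hm, List.foldl, List.foldl, pv_inner_step]
      norm_num
      constructor <;> ring
    · have hm0 : m = 0 := by omega
      subst hm0
      decide

-- ===== VERDICT =====
theorem locate_room_spec : Claim_equal_locate_room := by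
  intro n _ hpre
  unfold Pre_locate_room at hpre
  unfold Spec_locate_room locate_room locate_room_alt
  have hk : n = ((n.toNat : Int)) := by omega
  have hk1 : 1 ≤ n.toNat := by omega
  rw [hk, pv_outer n.toNat hk1]
  have h10 : pvFmt02d 10 = "10" := by decide
  have hF : ("F" : String) ++ "10" = "F10" := by decide
  simp only [Option.getD, h10]
  rw [String.append_assoc, hF]
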